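-- pv_equiv track=rewrite | github.com/ChoiceCoin/Voting | venv/Lib/site-packages/algosdk/logic.py | parse_uvarint
-- ===== SOURCE A (Python) =====
-- def parse_uvarint(buf):
--     x = 0
--     s = 0
--     for i, b in enumerate(buf):
--         if b < 0x80:
--             if i > 9 or i == 9 and b > 1:
--                 return 0, -(i + 1)
--             return x | int(b) << s, i + 1
--         x |= int(b & 0x7f) << s
--         s += 7
--
--     return 0, 0
-- ===== SOURCE B (Python) =====
-- def parse_uvarint(buf):
--     # Pass 1: locate the terminating byte (first b < 0x80); none found -> exhausted.
--     i = next((k for k, b in enumerate(buf) if b < 0x80), None)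
--     if i is None:
--         return 0, 0
--     b = buf[i]
--     if i > 9 or (i == 9 and b > 1):
--         return 0, -(i + 1)
--     # Pass 2: assemble the value from the continuation bytes, then the terminator.
--     x = 0
--     for k in range(i):
--         x |= (buf[k] & 0x7f) << (7 * k)
--     return x | int(b) << (7 * i), i + 1
-- ===== Notes on version B (the rewrite author's own statement) =====
-- stated objective: alternative
-- what changed: A assembles the value incrementally in a single pass with running shift state and early returns; B first scans to locate the terminating byte (first b < 0x80), checks overflow on that index, and only then assembles the value in a second pass using absolute shifts 7*k.
import Mathlib
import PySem

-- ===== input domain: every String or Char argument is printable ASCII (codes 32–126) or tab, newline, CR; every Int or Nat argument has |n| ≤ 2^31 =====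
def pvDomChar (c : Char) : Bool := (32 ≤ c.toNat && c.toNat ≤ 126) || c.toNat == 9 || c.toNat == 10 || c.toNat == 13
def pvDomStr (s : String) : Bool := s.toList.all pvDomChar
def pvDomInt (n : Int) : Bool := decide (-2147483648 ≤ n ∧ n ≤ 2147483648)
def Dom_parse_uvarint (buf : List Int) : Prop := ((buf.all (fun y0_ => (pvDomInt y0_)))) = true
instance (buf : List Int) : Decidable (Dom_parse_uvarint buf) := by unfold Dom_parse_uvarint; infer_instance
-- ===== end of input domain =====

-- B separates A's single accumulate-as-you-go loop into two passes: locate the terminator, then assemble; same cost, alternative decomposition.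


-- ===== PORT A =====
-- A's loop: running value x, running shift s (= 7*i), index i.
def parseLoopA : List Int → Int → Nat → Nat → Int × Int
  | [], _, _, _ => (0, 0)
  | b :: rest, x, s, i =>
    if b < 0x80 then
      if i > 9 ∨ (i = 9 ∧ b > 1) then (0, -((i : Int) + 1))
      else (PySem.Int.bor x (b <<< s), (i : Int) + 1)
    else parseLoopA rest (PySem.Int.bor x ((PySem.Int.band b 0x7f) <<< s)) (s + 7) (i + 1)

def parse_uvarint (buf : List Int) : Int × Int := parseLoopA buf 0 0 0

-- ===== PORT B =====
-- B's second pass: OR together the continuation bytes with absolute shifts 7*k.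
def assembleB (buf : List Int) (i : Nat) : Int :=
  (List.range i).foldl
    (fun x k => PySem.Int.bor x ((PySem.Int.band (buf.getD k 0) 0x7f) <<< (7 * k))) 0

def parse_uvarint_alt (buf : List Int) : Int × Int :=
  match buf.findIdx? (fun b => decide (b < 0x80)) with
  | none => (0, 0)
  | some i =>
    let b := buf.getD i 0
    if i > 9 ∨ (i = 9 ∧ b > 1) then (0, -((i : Int) + 1))
    else (PySem.Int.bor (assembleB buf i) (b <<< (7 * i)), (i : Int) + 1)

-- ===== PRECONDITION & SPEC =====
def Spec_parse_uvarint (buf : List Int) (out : Int × Int) : Prop := out = parse_uvarint_alt buf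
instance (buf : List Int) (out : Int × Int) : Decidable (Spec_parse_uvarint buf out) := by unfold Spec_parse_uvarint; infer_instance

-- ===== CLAIM (what is proved, stated in full; the proofs are below) =====
def Claim_equal_parse_uvarint : Prop := ∀ (buf : List Int), Dom_parse_uvarint buf → Spec_parse_uvarint buf (parse_uvarint buf)

-- ===== LEMMAS AND PROOFS =====

-- Generalised invariant: A's loop started at index i with accumulator x equals B's
-- two-pass result with all shifts offset by 7*i and the fold seeded with x.
theorem parseLoopA_eq_find (buf : List Int) : ∀ (x : Int) (i : Nat),
    parseLoopA buf x (7 * i) i =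
      match buf.findIdx? (fun b => decide (b < 0x80)) with
      | none => (0, 0)
      | some j =>
        let b := buf.getD j 0
        if i + j > 9 ∨ (i + j = 9 ∧ b > 1) then (0, -(((i + j : Nat) : Int) + 1))
        else (PySem.Int.bor
                ((List.range j).foldl
                  (fun x k => PySem.Int.bor x ((PySem.Int.band (buf.getD k 0) 0x7f) <<< (7 * (i + k)))) x)
                (b <<< (7 * (i + j))), ((i + j : Nat) : Int) + 1) := by
  induction buf with
  | nil => intro x i; simp [parseLoopA]
  | cons b rest ih =>
    intro x i
    by_cases hb : b < 0x80
    · simp [parseLoopA, hb, List.findIdx?_cons]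
    · have h7 : 7 * i + 7 = 7 * (i + 1) := by ring
      have hstep : parseLoopA (b :: rest) x (7 * i) i
          = parseLoopA rest (PySem.Int.bor x ((PySem.Int.band b 0x7f) <<< (7 * i))) (7 * (i + 1)) (i + 1) := by
        simp [parseLoopA, hb, h7]
      rw [hstep, ih]
      simp only [List.findIdx?_cons, decide_eq_true_eq, hb, if_false]
      cases hfind : rest.findIdx? (fun b => decide (b < 0x80)) with
      | none => simp
      | some j =>
        simp only [Option.map_some]
        have hidx : i + 1 + j = i + (j + 1) := by omega
        have hfold : ∀ y : Int,
            (List.range (j + 1)).foldl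
              (fun x k => PySem.Int.bor x ((PySem.Int.band ((b :: rest).getD k 0) 0x7f) <<< (7 * (i + k)))) y
            = (List.range j).foldl
              (fun x k => PySem.Int.bor x ((PySem.Int.band (rest.getD k 0) 0x7f) <<< (7 * (i + 1 + k))))
              (PySem.Int.bor y ((PySem.Int.band b 0x7f) <<< (7 * i))) := by
          intro y
          rw [List.range_succ_eq_map, List.foldl_cons, List.foldl_map]
          congr 1
          funext z k
          have : i + (k + 1) = i + 1 + k := by omega
          simp [List.getD, this]
        simp only [hidx, hfold, List.getD_cons_succ]

theorem parse_uvarint_eq_alt (buf : List Int) : parse_uvarint buf = parse_uvarint_alt buf := by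
  have h := parseLoopA_eq_find buf 0 0
  simp only [Nat.mul_zero, Nat.zero_add] at h
  unfold parse_uvarint parse_uvarint_alt
  rw [h]
  cases hfind : buf.findIdx? (fun b => decide (b < 0x80)) with
  | none => simp
  | some j => simp [assembleB]

-- ===== VERDICT (by name: the statement is the Claim_ definition above) =====
theorem parse_uvarint_spec : Claim_equal_parse_uvarint := by
  intro buf _
  unfold Spec_parse_uvarint
  exact parse_uvarint_eq_alt buf
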